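-- pv_equiv track=rewrite | github.com/seoeaa/OpenKB | openkb/agent/compiler.py | _replace_section_entry
-- ===== SOURCE A (Python) =====
-- def _get_section_bounds(lines: list[str], heading: str) -> tuple[int, int] | None:
--     """Return the [start, end) bounds for a Markdown H2 section."""
--     for i, line in enumerate(lines):
--         if line == heading:
--             start = i + 1
--             end = len(lines)
--             for j in range(start, len(lines)):
--                 if lines[j].startswith("## "):
--                     end = j
--                     break
--             return start, end
--     return None
--
-- def _replace_section_entry(lines: list[str], heading: str, link: str, entry: str) -> bool:
--     """Replace the first matching entry within a specific section."""
--     bounds = _get_section_bounds(lines, heading)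
--     if bounds is None:
--         return False
--
--     start, end = bounds
--     entry_prefix = f"- {link}"
--     for i in range(start, end):
--         if lines[i].startswith(entry_prefix):
--             lines[i] = entry
--             return True
--     return False
-- ===== SOURCE B (Python) =====
-- def _replace_section_entry(lines: list[str], heading: str, link: str, entry: str) -> bool:
--     """Replace the first matching entry within a specific section (single pass)."""
--     entry_prefix = f"- {link}"
--     in_section = False
--     for i, line in enumerate(lines):
--         if in_section:
--             if line.startswith("## "):
--                 return False
--             if line.startswith(entry_prefix):
--                 lines[i] = entry
--                 return True
--         elif line == heading:
--             in_section = True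
--     return False
-- ===== Notes on version B (the rewrite author's own statement) =====
-- stated objective: simpler
-- what changed: Replaces the two-phase bounds-finding helper plus windowed index scan with one single linear pass over the lines carrying an in_section flag.
import Mathlib
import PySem

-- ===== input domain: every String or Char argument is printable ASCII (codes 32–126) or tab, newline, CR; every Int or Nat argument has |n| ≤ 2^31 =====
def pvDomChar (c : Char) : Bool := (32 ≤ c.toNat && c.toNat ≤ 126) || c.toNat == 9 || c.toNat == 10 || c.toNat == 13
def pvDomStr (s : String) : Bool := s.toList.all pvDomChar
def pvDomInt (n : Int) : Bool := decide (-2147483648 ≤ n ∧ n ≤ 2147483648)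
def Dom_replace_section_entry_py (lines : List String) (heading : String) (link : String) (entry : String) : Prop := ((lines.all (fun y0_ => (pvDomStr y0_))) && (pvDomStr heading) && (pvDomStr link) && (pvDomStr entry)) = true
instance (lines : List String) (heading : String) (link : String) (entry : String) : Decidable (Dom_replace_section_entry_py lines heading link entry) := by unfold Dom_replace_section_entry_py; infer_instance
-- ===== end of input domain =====

-- B is a single linear pass with an in_section flag instead of A's bounds-finding helper plus
-- windowed scan (objective: simpler). Both Pythons mutate `lines` identically on success; the
-- theorems below are about the RETURN value only.

-- ===== PORT A =====
-- inner loop of _get_section_bounds: `for j in range(start, len(lines)) …`; ported as a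
-- recursion over the suffix lines[start:] carrying the index j, default end = dflt = len(lines)
def pvFindHashEnd : List String → Nat → Nat → Nat
  | [], _, dflt => dflt
  | l :: t, j, dflt => if PySem.Str.startswith l "## " then j else pvFindHashEnd t (j + 1) dflt

-- `for i, line in enumerate(lines)` of _get_section_bounds: recursion over the list carrying i;
-- at the match point the tail t is exactly lines[i+1:] = lines[start:]
def pvGsbAux (heading : String) (total : Nat) : List String → Nat → Option (Nat × Nat)
  | [], _ => none
  | l :: t, i =>
    if l == heading then some (i + 1, pvFindHashEnd t (i + 1) total)
    else pvGsbAux heading total t (i + 1)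

-- `for i in range(start, end): if lines[i].startswith(entry_prefix) …` over lines[start:end]
def pvReplLoop (pfx : String) : List String → Bool
  | [] => false
  | l :: t => if PySem.Str.startswith l pfx then true else pvReplLoop pfx t

def replace_section_entry_py (lines : List String) (heading : String) (link : String) (_entry : String) : Bool :=
  match pvGsbAux heading lines.length lines 0 with
  | none => false
  | some (s, e) => pvReplLoop ("- " ++ link) ((lines.drop s).take (e - s))

-- ===== PORT B =====
-- the single loop of B, with the boolean in_section state
def pvAltLoop (heading pfx : String) : List String → Bool → Bool
  | [], _ => false
  | l :: t, inSec =>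
    if inSec then
      if PySem.Str.startswith l "## " then false
      else if PySem.Str.startswith l pfx then true
      else pvAltLoop heading pfx t true
    else if l == heading then pvAltLoop heading pfx t true
    else pvAltLoop heading pfx t false

def replace_section_entry_py_alt (lines : List String) (heading : String) (link : String) (_entry : String) : Bool :=
  pvAltLoop heading ("- " ++ link) lines false

-- ===== PRECONDITION & SPEC =====
def Spec_replace_section_entry_py (lines : List String) (heading : String) (link : String) (entry : String) (out : Bool) : Prop := out = replace_section_entry_py_alt lines heading link entry
instance (lines : List String) (heading : String) (link : String) (entry : String) (out : Bool) : Decidable (Spec_replace_section_entry_py lines heading link entry out) := by unfold Spec_replace_section_entry_py; infer_instance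

-- ===== CLAIM (what is proved, stated in full; the proofs are below) =====
def Claim_equal_replace_section_entry_py : Prop := ∀ (lines : List String) (heading : String) (link : String) (entry : String), Dom_replace_section_entry_py lines heading link entry → Spec_replace_section_entry_py lines heading link entry (replace_section_entry_py lines heading link entry)

-- ===== LEMMAS AND PROOFS =====

theorem pvFindHashEnd_ge (t : List String) (j dflt : Nat) (h : dflt = j + t.length) :
    j ≤ pvFindHashEnd t j dflt := by
  induction t generalizing j with
  | nil => simp [pvFindHashEnd, h]
  | cons l t ih =>
    simp only [List.length_cons] at h
    simp only [pvFindHashEnd]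
    split
    · exact le_refl _
    · exact le_trans (Nat.le_succ j) (ih (j + 1) (by omega))

-- in-section phase: A's windowed scan over lines[start:end] equals B's loop with inSec = true
theorem pv_inSection (heading pfx : String) (t : List String) (j dflt : Nat)
    (hlen : dflt = j + t.length) :
    pvReplLoop pfx (t.take (pvFindHashEnd t j dflt - j)) = pvAltLoop heading pfx t true := by
  induction t generalizing j with
  | nil => simp [pvFindHashEnd, pvReplLoop, pvAltLoop]
  | cons l t ih =>
    simp only [List.length_cons] at hlen
    cases hh : PySem.Chars.startswith l.toList ['#', '#', ' '] with
    | true => simp [pvFindHashEnd, pvAltLoop, pvReplLoop, hh]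
    | false =>
      have hge : j + 1 ≤ pvFindHashEnd t (j + 1) dflt :=
        pvFindHashEnd_ge t (j + 1) dflt (by omega)
      have htake : (l :: t).take (pvFindHashEnd t (j + 1) dflt - j)
          = l :: t.take (pvFindHashEnd t (j + 1) dflt - (j + 1)) := by
        have h2 : pvFindHashEnd t (j + 1) dflt - j
            = (pvFindHashEnd t (j + 1) dflt - (j + 1)) + 1 := by omega
        rw [h2, List.take_succ_cons]
      simp only [pvFindHashEnd, pvAltLoop, PySem.Str.startswith_eq]
      simp only [show ("## ".toList) = ['#', '#', ' '] from by decide, hh,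
        Bool.false_eq_true, if_false, if_true]
      rw [htake]
      simp only [pvReplLoop, PySem.Str.startswith_eq]
      rw [ih (j + 1) (by omega)]

-- search phase: for rest = lines.drop i, A's remaining computation equals B's loop with inSec = false
theorem pv_search (lines : List String) (heading pfx : String) (rest : List String) (i : Nat)
    (hrest : rest = lines.drop i) (hlen : i + rest.length = lines.length) :
    (match pvGsbAux heading lines.length rest i with
      | none => false
      | some (s, e) => pvReplLoop pfx ((lines.drop s).take (e - s)))
      = pvAltLoop heading pfx rest false := by
  induction rest generalizing i with
  | nil => simp [pvGsbAux, pvAltLoop]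
  | cons l t ih =>
    simp only [pvGsbAux, pvAltLoop]
    by_cases hl : l == heading
    · have hdrop : lines.drop (i + 1) = t := by
        have := congrArg (List.drop 1) hrest
        simpa [List.drop_drop, Nat.add_comm] using this.symm
      have hlen' : lines.length = (i + 1) + t.length := by
        simp at hlen; omega
      simp only [hl, if_true]
      rw [hdrop]
      exact pv_inSection heading pfx t (i + 1) lines.length hlen'
    · simp only [hl, if_false, Bool.false_eq_true]
      have hrest' : t = lines.drop (i + 1) := by
        have := congrArg (List.drop 1) hrest
        simpa [List.drop_drop, Nat.add_comm] using this
      exact ih (i + 1) hrest' (by simp at hlen ⊢; omega)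

-- ===== VERDICT (by name: the statement is the Claim_ definition above) =====
theorem replace_section_entry_py_spec : Claim_equal_replace_section_entry_py := by
  intro lines heading link entry _
  unfold Spec_replace_section_entry_py replace_section_entry_py replace_section_entry_py_alt
  exact pv_search lines heading ("- " ++ link) lines 0 (by simp) (by simp)
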